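-- pv_equiv track=rewrite | github.com/pypi-data/pypi-mirror-371 | packages/hilbert-quantization/hilbert_quantization-1.1.0-py3-none-any.whl/hilbert_quantization/core/dimension_calculator.py | _calculate_padding_positions
-- ===== SOURCE A (Python) =====
-- from typing import Tuple, List
--
-- def _calculate_padding_positions(param_count: int, dimensions: Tuple[int, int]) -> List[Tuple[int, int]]:
--     """
--     Calculate positions where padding should be applied.
--
--     Padding is applied at the end of the parameter space in row-major order.
--
--     Args:
--         param_count: Number of actual parameters
--         dimensions: Target dimensions (width, height)
--
--     Returns:
--         List of (x, y) positions for padding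
--     """
--     width, height = dimensions
--     total_space = width * height
--     padding_count = total_space - param_count
--
--     padding_positions = []
--
--     # Calculate padding positions starting from the end in row-major order
--     for i in range(padding_count):
--         pos_index = total_space - 1 - i
--         y = pos_index // width
--         x = pos_index % width
--         padding_positions.append((x, y))
--
--     return padding_positions
-- ===== SOURCE B (Python) =====
-- from typing import Tuple, List
--
-- def _calculate_padding_positions(param_count: int, dimensions: Tuple[int, int]) -> List[Tuple[int, int]]:
--     """Build the whole grid in forward row-major order, then take the tail past
--     param_count and reverse it: two staged passes, no per-element index arithmetic."""
--     width, height = dimensions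
--     if width * height - param_count <= 0:
--         return []
--     cells = [(x, y) for y in range(height) for x in range(width)]
--     return cells[param_count:][::-1]
-- ===== Notes on version B (the rewrite author's own statement) =====
-- stated objective: alternative
-- what changed: B replaces A's single loop that computes each padding cell by divmod of a descending linear index with two staged passes: it materialises the whole grid in forward row-major order with a nested comprehension, then slices off the first param_count cells and reverses the tail.
-- outside the precondition, e.g. on _calculate_padding_positions(2, (-2, -2)): A returns [(-1, -2), (0, -1)], B returns []; on _calculate_padding_positions(-1, (2, 1)): A returns [(1, 0), (0, 0), (1, -1)], B returns [(1, 0)]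
import Mathlib
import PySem

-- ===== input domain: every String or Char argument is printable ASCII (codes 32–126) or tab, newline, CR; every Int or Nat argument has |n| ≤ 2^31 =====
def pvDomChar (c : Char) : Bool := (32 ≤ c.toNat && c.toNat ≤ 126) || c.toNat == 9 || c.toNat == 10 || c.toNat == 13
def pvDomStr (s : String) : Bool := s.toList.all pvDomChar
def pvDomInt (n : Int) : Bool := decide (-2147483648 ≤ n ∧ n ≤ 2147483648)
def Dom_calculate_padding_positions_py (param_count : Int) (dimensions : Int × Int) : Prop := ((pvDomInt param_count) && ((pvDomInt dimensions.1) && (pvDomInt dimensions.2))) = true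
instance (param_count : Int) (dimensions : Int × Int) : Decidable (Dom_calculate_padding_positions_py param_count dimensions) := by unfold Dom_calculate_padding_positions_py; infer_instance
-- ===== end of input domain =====

-- B builds the full grid forward in row-major order and returns the reversed tail past
-- param_count (two staged passes) instead of A's per-element divmod on a descending
-- linear index; same cost class, different decomposition.


-- ===== PORT A =====
def calculate_padding_positions_py (param_count : Int) (dimensions : Int × Int) : List (Int × Int) :=
  let width := dimensions.1
  let height := dimensions.2
  let total_space := width * height
  let padding_count := total_space - param_count
  (PySem.List.pyRange 0 padding_count 1).foldl
    (fun acc i =>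
      let pos_index := total_space - 1 - i
      let y := PySem.Int.floordiv pos_index width
      let x := PySem.Int.mod pos_index width
      acc ++ [(x, y)]) []

-- ===== PORT B =====
def calculate_padding_positions_py_alt (param_count : Int) (dimensions : Int × Int) : List (Int × Int) :=
  let width := dimensions.1
  let height := dimensions.2
  if width * height - param_count ≤ 0 then []
  else
    -- cells = [(x, y) for y in range(height) for x in range(width)]
    let cells := (PySem.List.pyRange 0 height 1).flatMap
      (fun y => (PySem.List.pyRange 0 width 1).map (fun x => (x, y)))
    -- cells[param_count:][::-1]  ([::-1] is reverse: PySem.List.slice?_none_none_neg_one)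
    (PySem.List.slice cells (some param_count) none).reverse

-- ===== PRECONDITION & SPEC =====
-- Pre_ excludes inputs A still returns on only outside the function's natural domain: a
-- non-positive width or a negative param_count while padding is needed — there A's
-- divmod-on-negative-index coordinates are artefacts (width = 0 even raises
-- ZeroDivisionError) and B's grid construction legitimately yields a different list.
def Pre_calculate_padding_positions_py (param_count : Int) (dimensions : Int × Int) : Prop :=
  dimensions.1 * dimensions.2 - param_count ≤ 0 ∨ (0 < dimensions.1 ∧ 0 ≤ param_count)
instance (param_count : Int) (dimensions : Int × Int) : Decidable (Pre_calculate_padding_positions_py param_count dimensions) := by unfold Pre_calculate_padding_positions_py; infer_instance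

def pvWitness_calculate_padding_positions_py : Int × (Int × Int) := (3, (2, 2))

def Spec_calculate_padding_positions_py (param_count : Int) (dimensions : Int × Int) (out : List (Int × Int)) : Prop := out = calculate_padding_positions_py_alt param_count dimensions
instance (param_count : Int) (dimensions : Int × Int) (out : List (Int × Int)) : Decidable (Spec_calculate_padding_positions_py param_count dimensions out) := by unfold Spec_calculate_padding_positions_py; infer_instance

-- ===== CLAIM (what is proved, stated in full; the proofs are below) =====
def Claim_equal_calculate_padding_positions_py : Prop := ∀ (param_count : Int) (dimensions : Int × Int), Dom_calculate_padding_positions_py param_count dimensions → Pre_calculate_padding_positions_py param_count dimensions → Spec_calculate_padding_positions_py param_count dimensions (calculate_padding_positions_py param_count dimensions)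

-- ===== LEMMAS AND PROOFS =====

-- the forward grid is the divmod decoding of the linear indices 0 .. w*h-1 (w > 0, h as Nat)
lemma pv_grid_eq (w : Int) (hw : 0 < w) : ∀ (m : Nat),
    (PySem.List.pyRange 0 (m : Int) 1).flatMap
        (fun y => (PySem.List.pyRange 0 w 1).map (fun x => (x, y)))
      = (List.range (w.toNat * m)).map
          (fun (j : Nat) => (((j : Nat) : Int) % w, ((j : Nat) : Int) / w)) := by
  intro m
  induction m with
  | zero => simp [PySem.List.pyRange_one_eq_nil]
  | succ m ih =>
    have hcast : ((m : Int) + 1) = ((m + 1 : Nat) : Int) := by push_cast; ring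
    have hsplit := PySem.List.pyRange_one_succ_right (a := 0) (b := (m : Int)) (by positivity)
    rw [← hcast, hsplit, List.flatMap_append, ih]
    have hrow : (PySem.List.pyRange 0 w 1).map (fun x => (x, (m : Int)))
        = (List.range w.toNat).map
            (fun (x : Nat) => (((w.toNat * m + x : Nat) : Int) % w, ((w.toNat * m + x : Nat) : Int) / w)) := by
      rw [PySem.List.pyRange_one, List.map_map]
      have hw0 : (w - 0).toNat = w.toNat := by omega
      rw [hw0]
      have hw' : w = (w.toNat : Int) := by omega
      apply List.map_congr_left
      intro x hx
      have hxw : x < w.toNat := List.mem_range.mp hx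
      have hxl : (x : Int) < w := by omega
      have ha : ((w.toNat * m + x : Nat) : Int) = (x : Int) + w * (m : Int) := by
        push_cast [Int.toNat_of_nonneg hw.le]; ring
      have hq1 : ((w.toNat * m + x : Nat) : Int) % w = (x : Int) := by
        rw [ha, Int.add_mul_emod_self_left, Int.emod_eq_of_lt (by omega) hxl]
      have hq2 : ((w.toNat * m + x : Nat) : Int) / w = (m : Int) := by
        rw [ha, Int.add_mul_ediv_left _ _ (by omega : w ≠ 0),
            Int.ediv_eq_zero_of_lt (by omega) hxl, zero_add]
      simp only [Function.comp_apply, zero_add, hq1, hq2]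
    simp only [List.flatMap_cons, List.flatMap_nil, List.append_nil]
    rw [hrow]
    have hwm : w.toNat * (m + 1) = w.toNat * m + w.toNat := by ring
    rw [hwm, List.range_add, List.map_append]
    congr 1
    rw [List.map_map]
    apply List.map_congr_left
    intro x _
    simp [Function.comp]

-- ===== VERDICT (by name: the statement is the Claim_ definition above) =====
theorem calculate_padding_positions_py_spec : Claim_equal_calculate_padding_positions_py := by
  intro param_count dims _hdom hpre
  unfold Spec_calculate_padding_positions_py
  unfold calculate_padding_positions_py calculate_padding_positions_py_alt
  obtain ⟨w, h⟩ := dims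
  simp only
  by_cases hle : w * h - param_count ≤ 0
  · rw [PySem.List.pyRange_one_eq_nil (by omega), if_pos hle]
    simp
  · rw [if_neg hle]
    obtain ⟨hw, hpc⟩ := hpre.resolve_left hle
    simp only at hw
    have hh0 : 0 ≤ h := by nlinarith
    lift h to ℕ using hh0 with hn
    rw [pv_grid_eq w hw]
    have hT : w * (hn : Int) = ((w.toNat * hn : Nat) : Int) := by
      push_cast [Int.toNat_of_nonneg hw.le]; ring
    -- A side: foldl-append over the range is a map
    rw [PySem.List.foldl_append_singleton_eq_map]
    have hpad : w * (hn : Int) - param_count = (((w * (hn : Int) - param_count).toNat : Nat) : Int) := by omega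
    rw [hpad, PySem.List.pyRange_zero_natCast, List.nil_append, List.map_map]
    -- B side: the slice is a drop
    rw [PySem.List.slice_from _ (by omega : (0:Int) ≤ param_count)]
    set n : Nat := w.toNat * hn with hndef
    set k : Nat := param_count.toNat with hk
    have hkn : k < n := by omega
    have hlen : ((w * (hn : Int) - param_count).toNat) = n - k := by omega
    apply List.ext_getElem
    · simp [hlen]
    · intro i h1 h2
      have hi : i < n - k := by simpa [hlen] using h1
      rw [List.getElem_map, List.getElem_range]
      rw [List.getElem_reverse, List.getElem_drop, List.getElem_map, List.getElem_range]
      simp only [Function.comp_apply, List.length_drop, List.length_map, List.length_range]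
      have hnat : k + (n - k - 1 - i) = n - 1 - i := by omega
      rw [hnat]
      have harg : w * (hn : Int) - 1 - ((i : Nat) : Int) = ((n - 1 - i : Nat) : Int) := by
        rw [hT]; omega
      rw [PySem.Int.mod_eq_emod_of_pos hw, PySem.Int.floordiv_eq_ediv_of_pos hw, harg]
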